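-- pv_equiv track=rewrite | github.com/Anatel-Phys/GrassmannLibrary | ComputeNonZeroGrassmanTerms.py | remove_terms_with_grassman_duplicates
-- ===== SOURCE A (Python) =====
-- def remove_terms_with_grassman_duplicates(termsInProduct):
--     nonZeroTerms = []
--
--     for term in termsInProduct:
--         termContainsDuplicate = False
--         for i in range(1,len(term) - 1):
--             if term[i][0] == 'g':
--                 for j in range(i + 1, len(term)):
--                     if term[j][0] == 'g':
--                         if term[j] == term[i]:
--                             termContainsDuplicate = True
--                             break
--         if not termContainsDuplicate:
--             nonZeroTerms.append(term)
--
--     return nonZeroTerms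
-- ===== SOURCE B (Python) =====
-- def remove_terms_with_grassman_duplicates(termsInProduct):
--     def no_dup(term):
--         gs = [x for x in term[1:] if x.startswith('g')]
--         return len(gs) == len(set(gs))
--     return [term for term in termsInProduct if no_dup(term)]
-- ===== Notes on version B (the rewrite author's own statement) =====
-- stated objective: simpler
-- what changed: Replaced A's nested index-based pairwise scan with break-flag by a collect-then-count test: gather the grassmann entries of term[1:] once and keep the term iff len(gs) == len(set(gs)).
import Mathlib
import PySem

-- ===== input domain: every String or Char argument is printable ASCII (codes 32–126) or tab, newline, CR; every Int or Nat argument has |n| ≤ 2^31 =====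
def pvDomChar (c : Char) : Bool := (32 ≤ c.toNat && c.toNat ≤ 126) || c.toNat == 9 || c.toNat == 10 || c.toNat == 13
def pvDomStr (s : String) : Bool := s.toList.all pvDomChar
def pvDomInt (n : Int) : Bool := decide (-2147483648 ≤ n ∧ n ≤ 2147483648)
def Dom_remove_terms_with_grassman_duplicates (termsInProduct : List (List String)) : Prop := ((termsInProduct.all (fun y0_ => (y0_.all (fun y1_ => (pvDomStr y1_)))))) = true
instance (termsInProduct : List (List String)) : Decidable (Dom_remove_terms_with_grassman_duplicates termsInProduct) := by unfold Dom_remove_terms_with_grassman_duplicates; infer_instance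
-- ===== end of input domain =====

-- B replaces A's nested pairwise scan by "collect the grassmann entries of term[1:], keep iff no duplicates
-- (len == len(set))"; equivalence of the RETURN values is proved on Pre_ (where Python A does not raise).

-- ===== PORT A =====
-- term[i][0] == 'g' : reading s[0] raises IndexError on s = "" (outside Pre_); `none` there is dead code on Pre_.
def pvHeadIsG (s : String) : Bool :=
  match PySem.Str.pyGet? s 0 with
  | some c => c == 'g'
  | none => false

-- the inner `for j in range(i+1, len(term))` with its break-on-first-duplicate;
-- `none` (IndexError, impossible: every j produced by pyRange here is in range) continues the scan.
def pvInnerScan (term : List String) (ti : String) : List Int → Bool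
  | [] => false
  | j :: js =>
    match PySem.List.pyGet? term j with
    | some tj =>
      if pvHeadIsG tj then
        if tj == ti then true else pvInnerScan term ti js
      else pvInnerScan term ti js
    | none => pvInnerScan term ti js

-- the outer `for i in range(1, len(term)-1)` accumulating termContainsDuplicate
def pvTermHasDup (term : List String) : Bool :=
  (PySem.List.pyRange 1 ((term.length : Int) - 1) 1).foldl
    (fun flag i =>
      match PySem.List.pyGet? term i with
      | some ti =>
        if pvHeadIsG ti then
          flag || pvInnerScan term ti (PySem.List.pyRange (i + 1) (term.length : Int) 1)
        else flag
      | none => flag) false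

def remove_terms_with_grassman_duplicates (termsInProduct : List (List String)) : List (List String) :=
  termsInProduct.foldl
    (fun nonZeroTerms term =>
      if pvTermHasDup term then nonZeroTerms else nonZeroTerms ++ [term]) []

-- ===== PORT B =====
def pvGs (term : List String) : List String :=
  (PySem.List.slice term (some 1) none).filter (fun x => PySem.Str.startswith x "g")

def remove_terms_with_grassman_duplicates_alt (termsInProduct : List (List String)) : List (List String) :=
  termsInProduct.filter (fun term => (pvGs term).length == (PySem.Set.ofList (pvGs term)).length)

-- ===== PRECONDITION & SPEC =====
-- exactly where Python A raises IndexError on a term: an empty string at an interior position 1..len-2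
-- (always read as term[i][0]), or at the last position while some interior entry starts with 'g'
-- (then the inner scan necessarily reads term[len-1][0]).
def pvTermRaisesA (t : List String) : Bool :=
  ((t.drop 1).dropLast).any (· == "") ||
  (t.getLast? == some "" && ((t.drop 1).dropLast).any (fun s => PySem.Str.startswith s "g"))

-- Pre_ excludes exactly the inputs on which Python A raises IndexError (reading ""[0]).
def Pre_remove_terms_with_grassman_duplicates (termsInProduct : List (List String)) : Prop :=
  termsInProduct.all (fun t => !pvTermRaisesA t) = true

instance (termsInProduct : List (List String)) : Decidable (Pre_remove_terms_with_grassman_duplicates termsInProduct) := by unfold Pre_remove_terms_with_grassman_duplicates; infer_instance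

def pvWitness_remove_terms_with_grassman_duplicates : List (List String) := [["1", "ga", "gb"], ["c", "ga", "ga"]]

def Spec_remove_terms_with_grassman_duplicates (termsInProduct : List (List String)) (out : List (List String)) : Prop := out = remove_terms_with_grassman_duplicates_alt termsInProduct
instance (termsInProduct : List (List String)) (out : List (List String)) : Decidable (Spec_remove_terms_with_grassman_duplicates termsInProduct out) := by unfold Spec_remove_terms_with_grassman_duplicates; infer_instance

-- ===== CLAIM (what is proved, stated in full; the proofs are below) =====
def Claim_equal_remove_terms_with_grassman_duplicates : Prop := ∀ (termsInProduct : List (List String)), Dom_remove_terms_with_grassman_duplicates termsInProduct → Pre_remove_terms_with_grassman_duplicates termsInProduct → Spec_remove_terms_with_grassman_duplicates termsInProduct (remove_terms_with_grassman_duplicates termsInProduct)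

-- ===== LEMMAS AND PROOFS =====

-- a "flag := flag or f x" loop is any
theorem pv_foldl_or {α : Type} (f : α → Bool) (l : List α) (b : Bool) :
    l.foldl (fun acc x => acc || f x) b = (b || l.any f) := by
  induction l generalizing b with
  | nil => simp
  | cons x xs ih => rw [List.foldl_cons, ih, List.any_cons, Bool.or_assoc]

-- A's reference pairwise scan in list form
def pvPairScan : List String → Bool
  | [] => false
  | x :: xs => (pvHeadIsG x && xs.any (fun y => pvHeadIsG y && y == x)) || pvPairScan xs

-- the j-loop's per-index test, and the i-loop's per-index test, as named predicates
def pvIdxPred (t : List String) (ti : String) (j : Int) : Bool :=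
  match PySem.List.pyGet? t j with
  | some tj => pvHeadIsG tj && tj == ti
  | none => false

def pvOuterPred (t : List String) (i : Int) : Bool :=
  match PySem.List.pyGet? t i with
  | some ti => pvHeadIsG ti && (PySem.List.pyRange (i + 1) (t.length : Int) 1).any (pvIdxPred t ti)
  | none => false

theorem pvInnerScan_eq_any (term : List String) (ti : String) (js : List Int) :
    pvInnerScan term ti js = js.any (pvIdxPred term ti) := by
  induction js with
  | nil => rfl
  | cons j js ih =>
    simp only [pvInnerScan, List.any_cons, pvIdxPred]
    cases h : PySem.List.pyGet? term j with
    | none => simp [ih]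
    | some tj =>
      by_cases hg : pvHeadIsG tj <;> by_cases he : tj == ti <;> simp [hg, he, ih]

-- any over the index range a..len with the j-test is any over the dropped suffix
theorem pv_inner_any (t : List String) (ti : String) (a : Nat) :
    (PySem.List.pyRange (a : Int) (t.length : Int) 1).any (pvIdxPred t ti)
      = (t.drop a).any (fun tj => pvHeadIsG tj && tj == ti) := by
  by_cases h : a < t.length
  · rw [PySem.List.pyRange_one_cons (by exact_mod_cast h)]
    rw [List.drop_eq_getElem_cons h]
    simp only [List.any_cons]
    have hg : PySem.List.pyGet? t (a : Int) = some t[a] := by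
      simp [PySem.List.pyGet?_natCast, List.getElem?_eq_getElem h]
    have hcast : ((a : Int) + 1) = (((a + 1 : Nat)) : Int) := by push_cast; ring
    have hhead : pvIdxPred t ti (a : Int) = (pvHeadIsG t[a] && t[a] == ti) := by
      simp only [pvIdxPred, hg]
    rw [hhead, hcast, pv_inner_any t ti (a + 1)]
  · have h1 : t.drop a = [] := List.drop_eq_nil_of_le (by omega)
    have h2 : PySem.List.pyRange (a : Int) (t.length : Int) 1 = [] :=
      PySem.List.pyRange_one_eq_nil (by exact_mod_cast Nat.le_of_not_lt h)
    simp [h1, h2]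
termination_by t.length - a

-- any over the index range a..len with the i-test is the pairwise scan of the dropped suffix
theorem pv_any_range_pair (t : List String) (a : Nat) :
    (PySem.List.pyRange (a : Int) (t.length : Int) 1).any (pvOuterPred t)
      = pvPairScan (t.drop a) := by
  by_cases h : a < t.length
  · rw [PySem.List.pyRange_one_cons (by exact_mod_cast h)]
    rw [List.drop_eq_getElem_cons h]
    simp only [List.any_cons, pvPairScan]
    have hg : PySem.List.pyGet? t (a : Int) = some t[a] := by
      simp [PySem.List.pyGet?_natCast, List.getElem?_eq_getElem h]
    have hcast : ((a : Int) + 1) = (((a + 1 : Nat)) : Int) := by push_cast; ring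
    have hhead : pvOuterPred t (a : Int)
        = (pvHeadIsG t[a] && (t.drop (a + 1)).any (fun tj => pvHeadIsG tj && tj == t[a])) := by
      simp only [pvOuterPred, hg]
      rw [hcast, pv_inner_any t t[a] (a + 1)]
    rw [hhead, hcast, pv_any_range_pair t (a + 1)]
  · have h1 : t.drop a = [] := List.drop_eq_nil_of_le (by omega)
    have h2 : PySem.List.pyRange (a : Int) (t.length : Int) 1 = [] :=
      PySem.List.pyRange_one_eq_nil (by exact_mod_cast Nat.le_of_not_lt h)
    simp [h1, h2, pvPairScan]
termination_by t.length - a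

-- the port's outer index set stops at len-2, but index len-1 contributes nothing (its inner range is empty)
theorem pvTermHasDup_eq_pairScan (t : List String) :
    pvTermHasDup t = pvPairScan (t.drop 1) := by
  unfold pvTermHasDup
  have hbody : (fun (flag : Bool) (i : Int) =>
      match PySem.List.pyGet? t i with
      | some ti =>
        if pvHeadIsG ti then
          flag || pvInnerScan t ti (PySem.List.pyRange (i + 1) (t.length : Int) 1)
        else flag
      | none => flag)
      = fun flag i => flag || pvOuterPred t i := by
    funext flag i
    simp only [pvOuterPred]
    cases hg : PySem.List.pyGet? t i with
    | none => simp
    | some ti =>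
      by_cases hgi : pvHeadIsG ti <;> simp [hgi, pvInnerScan_eq_any]
  rw [hbody, pv_foldl_or, Bool.false_or]
  have hext : (PySem.List.pyRange 1 ((t.length : Int) - 1) 1).any (pvOuterPred t)
      = (PySem.List.pyRange 1 (t.length : Int) 1).any (pvOuterPred t) := by
    by_cases h2 : 2 ≤ t.length
    · have hsplit : (t.length : Int) = ((t.length : Int) - 1) + 1 := by ring
      rw [hsplit, PySem.List.pyRange_one_succ_right (by omega)]
      rw [List.any_append]
      have hlast : pvOuterPred t ((t.length : Int) - 1) = false := by
        have hemp : PySem.List.pyRange (((t.length : Int) - 1) + 1) ((t.length : Int)) 1 = [] :=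
          PySem.List.pyRange_one_eq_nil (by omega)
        simp only [pvOuterPred, hemp]
        cases hg : PySem.List.pyGet? t ((t.length : Int) - 1) <;> simp
      simp [hlast]
    · have ha : PySem.List.pyRange 1 ((t.length : Int) - 1) 1 = [] :=
        PySem.List.pyRange_one_eq_nil (by omega)
      have hb : PySem.List.pyRange 1 (t.length : Int) 1 = [] :=
        PySem.List.pyRange_one_eq_nil (by omega)
      rw [ha, hb]
  rw [hext]
  exact_mod_cast pv_any_range_pair t 1

theorem pvPairScan_iff (l : List String) :
    pvPairScan l = true ↔ ¬ (l.filter pvHeadIsG).Nodup := by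
  induction l with
  | nil => simp [pvPairScan]
  | cons x xs ih =>
    by_cases hg : pvHeadIsG x = true
    · rw [List.filter_cons_of_pos hg, List.nodup_cons]
      simp only [pvPairScan, hg, Bool.true_and, Bool.or_eq_true, List.any_eq_true, ih]
      constructor
      · rintro (⟨y, hy, hc⟩ | h)
        · intro hcon
          have hyx : y = x := by simpa using (Bool.and_elim_right hc)
          have hgy := Bool.and_elim_left hc
          exact hcon.1 (List.mem_filter.mpr ⟨hyx ▸ hy, hyx ▸ hgy⟩)
        · intro hcon; exact h hcon.2
      · intro h
        by_cases hm : x ∈ xs.filter pvHeadIsG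
        · exact Or.inl ⟨x, (List.mem_filter.mp hm).1, by simp [hg]⟩
        · refine Or.inr (fun hnd => h ⟨hm, hnd⟩)
    · rw [List.filter_cons_of_neg hg]
      rw [Bool.not_eq_true] at hg
      have hany : xs.any (fun y => pvHeadIsG y && y == x) = false := by
        apply List.any_eq_false.mpr
        intro y hy
        by_cases hyx : y = x
        · subst hyx; simp [hg]
        · simp [hyx]
      simp only [pvPairScan, hany, hg, Bool.and_false, Bool.false_or, ih]

theorem pv_len_set_iff (l : List String) :
    ((l.length == (PySem.Set.ofList l).length) = true) ↔ l.Nodup := by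
  constructor
  · intro h
    have hlen : l.length = (PySem.Set.ofList l).length := by simpa using h
    have hperm : (PySem.Set.ofList l).Perm l.dedup :=
      List.perm_of_nodup_nodup_toFinset_eq (PySem.Set.nodup_ofList l) l.nodup_dedup
        (by ext x; simp [PySem.Set.mem_ofList, List.mem_dedup, List.mem_toFinset])
    have hdl : l.dedup.length = l.length := by
      rw [← hperm.length_eq, ← hlen]
    have : l.dedup = l := (List.dedup_sublist l).eq_of_length hdl
    exact List.dedup_eq_self.mp this
  · intro h
    rw [PySem.Set.ofList_eq_self_of_nodup l h]
    simp

theorem pv_startswith_g (x : String) : PySem.Str.startswith x "g" = pvHeadIsG x := by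
  unfold pvHeadIsG
  have hG : ("g" : String).toList = ['g'] := by decide
  cases hx : x.toList with
  | nil =>
    simp [PySem.Str.startswith_eq, PySem.Str.pyGet?_eq, PySem.Chars.pyGet?_eq_listPyGet?, hx, hG,
      PySem.Chars.startswith, PySem.List.pyGet?]
  | cons c cs =>
    have hget : PySem.List.pyGet? (c :: cs) (0 : Int) = some c := PySem.List.pyGet?_zero_cons c cs
    have hs : PySem.Chars.startswith (c :: cs) ['g'] = (c == 'g') := by
      by_cases hc : c = 'g'
      · subst hc
        have := (PySem.Chars.startswith_iff ('g' :: cs) ['g']).mpr ⟨cs, rfl⟩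
        simp [this]
      · have hnp : ¬ (['g'] <+: c :: cs) := by
          rintro ⟨r, hr⟩
          simp only [List.singleton_append, List.cons.injEq] at hr
          exact hc hr.1.symm
        have hf : PySem.Chars.startswith (c :: cs) ['g'] = false := by
          cases hb : PySem.Chars.startswith (c :: cs) ['g']
          · rfl
          · exact absurd ((PySem.Chars.startswith_iff _ _).mp hb) hnp
        simp [hf, hc]
    simp [PySem.Str.startswith_eq, PySem.Str.pyGet?_eq, PySem.Chars.pyGet?_eq_listPyGet?, hx, hG,
      hs]

-- the two keep-predicates agree on every term
theorem pv_pred_eq (t : List String) :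
    (!pvTermHasDup t) = ((pvGs t).length == (PySem.Set.ofList (pvGs t)).length) := by
  have hgs : pvGs t = (t.drop 1).filter pvHeadIsG := by
    unfold pvGs
    rw [PySem.List.slice_from_one, ← List.drop_one]
    exact List.filter_congr (fun x _ => pv_startswith_g x)
  rw [hgs, pvTermHasDup_eq_pairScan]
  cases hp : pvPairScan (t.drop 1) with
  | false =>
    have hn : ((t.drop 1).filter pvHeadIsG).Nodup := by
      by_contra hn
      rw [(pvPairScan_iff _).mpr hn] at hp
      exact Bool.noConfusion hp
    exact ((pv_len_set_iff _).mpr hn).symm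
  | true =>
    have hnn := (pvPairScan_iff _).mp hp
    cases hq : (((t.drop 1).filter pvHeadIsG).length ==
        (PySem.Set.ofList ((t.drop 1).filter pvHeadIsG)).length) with
    | false => rfl
    | true => exact absurd ((pv_len_set_iff _).mp hq) hnn

-- ===== VERDICT (by name: the statement is the Claim_ definition above) =====
theorem remove_terms_with_grassman_duplicates_spec : Claim_equal_remove_terms_with_grassman_duplicates := by
  intro ts _ _
  unfold Spec_remove_terms_with_grassman_duplicates
  unfold remove_terms_with_grassman_duplicates remove_terms_with_grassman_duplicates_alt
  have : (fun (acc : List (List String)) (term : List String) =>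
      if pvTermHasDup term then acc else acc ++ [term]) =
      (fun acc term => if (!pvTermHasDup term) = true then acc ++ [id term] else acc) := by
    funext acc term
    cases pvTermHasDup term <;> simp
  rw [this, PySem.List.foldl_append_if (fun term => !pvTermHasDup term) id ts []]
  simp only [List.map_id, List.nil_append]
  exact List.filter_congr (fun t _ => pv_pred_eq t)
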